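-- pv_equiv track=rewrite | github.com/ziqingW/python-exercises-flex-Mar03 | list_exercises/bonus.py | rowmulti
-- ===== SOURCE A (Python) =====
-- def rowmulti(m1row, m2, m1size):
-- # mrow is the childlist for newly multiplied matrix
--     mrow = []
--     for i in range(m1size):
-- # rowresult to calculate each value of new childlist in final matrix
--         rowresult = 0
--         for j in range(len(m2)):
--             rowresult += m1row[j] * m2[j][i]
--         mrow.append(rowresult)
--     return mrow
-- ===== SOURCE B (Python) =====
-- def rowmulti(m1row, m2, m1size):
--     # SAXPY-style column accumulation: keep all partial sums at once,
--     # add each row's contribution in one sweep (j outer, i inner).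
--     mrow = [0] * m1size
--     for x, row in zip(m1row, m2):
--         for i in range(len(mrow)):
--             mrow[i] += x * row[i]
--     return mrow
-- ===== Notes on version B (the rewrite author's own statement) =====
-- stated objective: alternative
-- what changed: Dot-product-per-entry (i outer, j inner, one sum completed at a time) is replaced by SAXPY-style column accumulation over zip(m1row, m2) (j outer, i inner), maintaining all partial sums in a mutable row at once.
import Mathlib
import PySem

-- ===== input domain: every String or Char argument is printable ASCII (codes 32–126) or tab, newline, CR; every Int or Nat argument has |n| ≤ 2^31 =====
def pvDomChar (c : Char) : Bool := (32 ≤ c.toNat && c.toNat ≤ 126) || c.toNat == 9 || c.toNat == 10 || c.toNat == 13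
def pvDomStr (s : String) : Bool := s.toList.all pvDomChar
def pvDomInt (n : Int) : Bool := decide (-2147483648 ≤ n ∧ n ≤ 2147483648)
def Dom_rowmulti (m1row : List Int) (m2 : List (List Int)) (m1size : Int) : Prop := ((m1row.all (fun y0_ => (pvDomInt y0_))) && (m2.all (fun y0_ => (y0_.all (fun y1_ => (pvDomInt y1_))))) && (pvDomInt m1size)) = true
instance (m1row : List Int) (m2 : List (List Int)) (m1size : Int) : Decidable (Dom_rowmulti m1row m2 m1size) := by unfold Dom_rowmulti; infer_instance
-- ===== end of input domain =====

-- B replaces the per-entry dot product (i outer, j inner) by SAXPY-style column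
-- accumulation over zip(m1row, m2) (j outer, i inner): same cost, different traversal.

-- ===== PORT A =====
def rowmulti (m1row : List Int) (m2 : List (List Int)) (m1size : Int) : List Int :=
  (PySem.List.pyRange 0 m1size 1).foldl
    (fun mrow i =>
      mrow ++ [(PySem.List.pyRange 0 (m2.length : Int) 1).foldl
        (fun rowresult j =>
          rowresult + PySem.List.pyGetD m1row j 0 * PySem.List.pyGetD (PySem.List.pyGetD m2 j []) i 0)
        0])
    []

-- ===== PORT B =====
def rowmulti_alt (m1row : List Int) (m2 : List (List Int)) (m1size : Int) : List Int :=
  (m1row.zip m2).foldl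
    (fun mrow p =>
      (List.range mrow.length).foldl
        (fun m i => m.set i (m.getD i 0 + p.1 * PySem.List.pyGetD p.2 (i : Int) 0))
        mrow)
    (List.replicate m1size.toNat 0)

-- ===== PRECONDITION & SPEC =====
-- Pre_ excludes exactly the inputs where A raises IndexError: m1size > 0 together with
-- m1row shorter than m2 or some row of m2 shorter than m1size.
def Pre_rowmulti (m1row : List Int) (m2 : List (List Int)) (m1size : Int) : Prop :=
  m1size ≤ 0 ∨ ((m2.length : Int) ≤ (m1row.length : Int) ∧ ∀ row ∈ m2, m1size ≤ (row.length : Int))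
instance (m1row : List Int) (m2 : List (List Int)) (m1size : Int) : Decidable (Pre_rowmulti m1row m2 m1size) := by unfold Pre_rowmulti; infer_instance

def pvWitness_rowmulti : List Int × List (List Int) × Int := ([1, 2], [[3, 4], [5, 6]], 2)

def Spec_rowmulti (m1row : List Int) (m2 : List (List Int)) (m1size : Int) (out : List Int) : Prop := out = rowmulti_alt m1row m2 m1size
instance (m1row : List Int) (m2 : List (List Int)) (m1size : Int) (out : List Int) : Decidable (Spec_rowmulti m1row m2 m1size out) := by unfold Spec_rowmulti; infer_instance

-- ===== CLAIM (what is proved, stated in full; the proofs are below) =====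
def Claim_equal_rowmulti : Prop := ∀ (m1row : List Int) (m2 : List (List Int)) (m1size : Int), Dom_rowmulti m1row m2 m1size → Pre_rowmulti m1row m2 m1size → Spec_rowmulti m1row m2 m1size (rowmulti m1row m2 m1size)

-- ===== LEMMAS AND PROOFS =====

-- the common value: the dot product of m1row with column i, as a left fold over the zip
def pvDot (l : List (Int × List Int)) (i : Nat) : Int :=
  l.foldl (fun s p => s + p.1 * PySem.List.pyGetD p.2 (i : Int) 0) 0

lemma pvDot_eq_sum (l : List (Int × List Int)) (i : Nat) :
    pvDot l i = (l.map (fun p => p.1 * PySem.List.pyGetD p.2 (i : Int) 0)).sum := by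
  unfold pvDot
  rw [PySem.List.foldl_add]
  simp

lemma pvDot_cons (p : Int × List Int) (l : List (Int × List Int)) (i : Nat) :
    pvDot (p :: l) i = p.1 * PySem.List.pyGetD p.2 (i : Int) 0 + pvDot l i := by
  simp [pvDot_eq_sum]

-- A's inner loop over indices equals the fold over the zip
lemma pvInner_eq (a : List Int) (b : List (List Int)) (i : Nat) (s : Int)
    (h : b.length ≤ a.length) :
    (PySem.List.pyRange 0 (b.length : Int) 1).foldl
      (fun r j => r + PySem.List.pyGetD a j 0 * PySem.List.pyGetD (PySem.List.pyGetD b j []) (i : Int) 0) s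
    = (a.zip b).foldl (fun r p => r + p.1 * PySem.List.pyGetD p.2 (i : Int) 0) s := by
  rw [PySem.List.foldl_add, PySem.List.foldl_add]
  congr 1
  congr 1
  rw [PySem.List.pyRange_one]
  rw [List.map_map]
  apply List.ext_getElem
  · simp [Nat.min_eq_right h]
  · intro k hk hk2
    simp only [List.getElem_map, List.getElem_range, Function.comp_apply, List.getElem_zip]
    have hkb : k < b.length := by simpa using hk
    have hka : k < a.length := lt_of_lt_of_le hkb h
    have h1 : PySem.List.pyGetD a ((0:Int) + (k:Int)) 0 = a[k] := by
      rw [zero_add, PySem.List.pyGetD_natCast, List.getD_eq_getElem?_getD, List.getElem?_eq_getElem hka]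
      rfl
    have h2 : PySem.List.pyGetD b ((0:Int) + (k:Int)) [] = b[k] := by
      rw [zero_add, PySem.List.pyGetD_natCast, List.getD_eq_getElem?_getD, List.getElem?_eq_getElem hkb]
      rfl
    rw [h1, h2]

-- the in-place update loop of B, as one functional step
lemma pvSetLoop (g : Nat → Int) (m : List Int) : ∀ (pre : List Int),
    (List.range' pre.length m.length).foldl (fun acc i => acc.set i (acc.getD i 0 + g i)) (pre ++ m)
    = pre ++ m.mapIdx (fun j v => v + g (pre.length + j)) := by
  induction m with
  | nil => intro pre; simp
  | cons v m' ih =>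
    intro pre
    rw [List.length_cons, List.range'_succ, List.foldl_cons]
    have hget : (pre ++ v :: m').getD pre.length 0 = v := by
      rw [List.getD_eq_getElem?_getD, List.getElem?_append_right (le_refl pre.length)]
      simp
    have hset : (pre ++ v :: m').set pre.length (v + g pre.length)
        = (pre ++ [v + g pre.length]) ++ m' := by
      rw [List.set_append_right _ _ (le_refl pre.length)]
      simp
    rw [hget, hset]
    have hlen : pre.length + 1 = (pre ++ [v + g pre.length]).length := by simp
    rw [hlen, ih (pre ++ [v + g pre.length])]
    simp only [List.mapIdx_cons, List.append_assoc, List.length_append, List.length_singleton,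
      List.cons_append, List.nil_append]
    congr 1
    congr 1
    congr 1
    funext j w
    rw [Nat.add_assoc, Nat.add_comm 1 j]

lemma pvStep_map (g : Nat → Int) (n : Nat) (d : Nat → Int) :
    (List.range ((List.range n).map d).length).foldl
      (fun m i => m.set i (m.getD i 0 + g i)) ((List.range n).map d)
    = (List.range n).map (fun i => d i + g i) := by
  have h0 := pvSetLoop g ((List.range n).map d) []
  simp only [List.length_nil, List.nil_append, zero_add] at h0
  rw [← List.range_eq_range'] at h0
  rw [h0]
  apply List.ext_getElem
  · simp
  · intro k hk hk2
    simp [List.getElem_mapIdx]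

lemma pvB_char (n : Nat) : ∀ (l : List (Int × List Int)) (d : Nat → Int),
    l.foldl (fun mrow p =>
      (List.range mrow.length).foldl
        (fun m i => m.set i (m.getD i 0 + p.1 * PySem.List.pyGetD p.2 (i : Int) 0)) mrow)
      ((List.range n).map d)
    = (List.range n).map (fun i => d i + pvDot l i) := by
  intro l
  induction l with
  | nil => intro d; simp [pvDot]
  | cons p l' ih =>
    intro d
    rw [List.foldl_cons]
    rw [pvStep_map (fun i => p.1 * PySem.List.pyGetD p.2 (i : Int) 0) n d]
    rw [ih (fun i => d i + p.1 * PySem.List.pyGetD p.2 (i : Int) 0)]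
    congr 1
    funext i
    rw [pvDot_cons]
    ring

lemma pvA_char (m1row : List Int) (m2 : List (List Int)) (m1size : Int)
    (h : m2.length ≤ m1row.length) :
    rowmulti m1row m2 m1size
    = (List.range m1size.toNat).map (fun i => pvDot (m1row.zip m2) i) := by
  unfold rowmulti
  rw [PySem.List.pyRange_one 0 m1size]
  rw [List.foldl_map]
  rw [PySem.List.foldl_append_singleton_eq_map]
  simp only [Int.sub_zero, List.nil_append]
  apply List.map_congr_left
  intro k _
  have hi := pvInner_eq m1row m2 k 0 h
  have hz : (0:Int) + (k:Int) = (k:Int) := by ring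
  rw [hz, hi]
  rw [pvDot_eq_sum, PySem.List.foldl_add]
  simp

-- ===== VERDICT (by name: the statement is the Claim_ definition above) =====
lemma pvFoldl_nil (l : List (Int × List Int)) :
    l.foldl (fun mrow p =>
      (List.range mrow.length).foldl
        (fun m i => m.set i (m.getD i 0 + p.1 * PySem.List.pyGetD p.2 (i : Int) 0)) mrow)
      [] = [] := by
  induction l with
  | nil => rfl
  | cons p l' ih => simpa using ih

theorem rowmulti_spec : Claim_equal_rowmulti := by
  intro m1row m2 m1size _ hpre
  unfold Spec_rowmulti
  rcases hpre with h0 | ⟨hl, _⟩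
  · have hn : m1size.toNat = 0 := by omega
    unfold rowmulti rowmulti_alt
    rw [hn, PySem.List.pyRange_one_eq_nil h0]
    simpa using (pvFoldl_nil (m1row.zip m2)).symm
  · have hl' : m2.length ≤ m1row.length := by exact_mod_cast hl
    rw [pvA_char m1row m2 m1size hl']
    unfold rowmulti_alt
    have hrep : List.replicate m1size.toNat (0:Int) = (List.range m1size.toNat).map (fun _ => 0) := by
      simp
    rw [hrep, pvB_char m1size.toNat (m1row.zip m2) (fun _ => 0)]
    simp
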